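-- pv_equiv track=rewrite | github.com/yugavardhank/audio11 | backend/pipeline/metrics.py | boundaries_to_segments
-- ===== SOURCE A (Python) =====
-- from typing import List, Tuple
--
-- def boundaries_to_segments(boundaries: List[int]) -> List[Tuple[int, int]]:
--     """
--     Convert binary boundary vector to segment spans.
--
--     Args:
--         boundaries: Binary vector where 1 = boundary
--
--     Returns:
--         List of (start, end) tuples for each segment
--     """
--     segments = []
--     start = 0
--
--     for i, is_boundary in enumerate(boundaries[1:], 1):
--         if is_boundary:
--             segments.append((start, i - 1))
--             start = i
--
--     if start < len(boundaries):
--         segments.append((start, len(boundaries) - 1))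
--
--     return segments
-- ===== SOURCE B (Python) =====
-- from typing import List, Tuple
--
-- def boundaries_to_segments(boundaries: List[int]) -> List[Tuple[int, int]]:
--     if not boundaries:
--         return []
--     cuts = [i for i in range(1, len(boundaries)) if boundaries[i]]
--     starts = [0] + cuts
--     ends = [c - 1 for c in cuts] + [len(boundaries) - 1]
--     return list(zip(starts, ends))
-- ===== Notes on version B (the rewrite author's own statement) =====
-- stated objective: alternative
-- what changed: Replaces the single accumulate-while-scanning loop (mutable start, append on each boundary, trailing-segment fixup) with a build-then-pair shape: collect the cut indices in one comprehension, then zip the start list (zero followed by the cuts) with the shifted end list.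
import Mathlib
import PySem

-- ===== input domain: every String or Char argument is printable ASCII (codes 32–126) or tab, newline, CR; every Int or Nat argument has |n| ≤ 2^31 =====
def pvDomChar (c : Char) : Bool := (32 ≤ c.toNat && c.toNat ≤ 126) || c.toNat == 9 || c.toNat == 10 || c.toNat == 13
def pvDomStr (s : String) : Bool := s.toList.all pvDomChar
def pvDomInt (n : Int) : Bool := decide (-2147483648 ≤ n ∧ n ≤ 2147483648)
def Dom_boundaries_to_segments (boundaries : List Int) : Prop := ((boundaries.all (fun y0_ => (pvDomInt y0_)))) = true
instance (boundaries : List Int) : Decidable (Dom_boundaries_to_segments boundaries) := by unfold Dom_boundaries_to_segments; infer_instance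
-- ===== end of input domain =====

-- B replaces A's accumulate-while-scanning loop by a build-then-pair shape (collect cut
-- indices, then zip starts with ends); alternative decomposition, same O(n) cost.

-- ===== PORT A =====
-- for i, is_boundary in enumerate(boundaries[1:], 1): accumulate (segments, start); then trailing segment
def boundaries_to_segments (boundaries : List Int) : List (Int × Int) :=
  let p := (PySem.List.enumerate (PySem.List.slice boundaries (some 1) none) 1).foldl
    (fun (st : List (Int × Int) × Int) (pr : Int × Int) =>
      if pr.2 ≠ 0 then (st.1 ++ [(st.2, pr.1 - 1)], pr.1) else st)
    ([], 0)
  if p.2 < (boundaries.length : Int) then p.1 ++ [(p.2, (boundaries.length : Int) - 1)] else p.1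

-- ===== PORT B =====
def boundaries_to_segments_alt (boundaries : List Int) : List (Int × Int) :=
  if boundaries = [] then []
  else
    let n : Int := boundaries.length
    let cuts := (PySem.List.pyRange 1 n 1).filter
      (fun i => PySem.List.pyGetD boundaries i 0 ≠ 0)
    let starts := 0 :: cuts
    let ends := cuts.map (fun c => c - 1) ++ [n - 1]
    starts.zip ends

-- ===== PRECONDITION & SPEC =====
def Spec_boundaries_to_segments (boundaries : List Int) (out : List (Int × Int)) : Prop := out = boundaries_to_segments_alt boundaries
instance (boundaries : List Int) (out : List (Int × Int)) : Decidable (Spec_boundaries_to_segments boundaries out) := by unfold Spec_boundaries_to_segments; infer_instance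

-- ===== CLAIM (what is proved, stated in full; the proofs are below) =====
def Claim_equal_boundaries_to_segments : Prop := ∀ (boundaries : List Int), Dom_boundaries_to_segments boundaries → Spec_boundaries_to_segments boundaries (boundaries_to_segments boundaries)

-- ===== LEMMAS AND PROOFS =====

-- segments appended by A's loop, given current start s
def segAux (s : Int) : List (Int × Int) → List (Int × Int)
  | [] => []
  | (i, v) :: ps => if v ≠ 0 then (s, i - 1) :: segAux i ps else segAux s ps

-- value of A's `start` after the loop
def lastStart (s : Int) : List (Int × Int) → Int
  | [] => s
  | (i, v) :: ps => if v ≠ 0 then lastStart i ps else lastStart s ps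

-- span list B's zip produces from a cut list
def zipSpans (s e : Int) : List Int → List (Int × Int)
  | [] => [(s, e)]
  | c :: cs => (s, c - 1) :: zipSpans c e cs

theorem foldA_eq (ps : List (Int × Int)) : ∀ (acc : List (Int × Int)) (s : Int),
    ps.foldl (fun (st : List (Int × Int) × Int) (pr : Int × Int) =>
      if pr.2 ≠ 0 then (st.1 ++ [(st.2, pr.1 - 1)], pr.1) else st) (acc, s)
      = (acc ++ segAux s ps, lastStart s ps) := by
  induction ps with
  | nil => intro acc s; simp [segAux, lastStart]
  | cons p ps ih =>
    intro acc s
    obtain ⟨i, v⟩ := p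
    by_cases hv : v = 0
    · rw [List.foldl_cons, if_neg (by simp [hv]), ih]
      simp [segAux, lastStart, hv]
    · rw [List.foldl_cons, if_pos (by simp [hv]), ih]
      simp [segAux, lastStart, hv]

theorem zip_eq_zipSpans (cs : List Int) : ∀ (s e : Int),
    (s :: cs).zip (cs.map (fun c => c - 1) ++ [e]) = zipSpans s e cs := by
  induction cs with
  | nil => intro s e; simp [zipSpans]
  | cons c cs ih => intro s e; simp [zipSpans, ← ih c e]

theorem seg_append_last (ps : List (Int × Int)) : ∀ (s e : Int),
    segAux s ps ++ [(lastStart s ps, e)]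
      = zipSpans s e ((ps.filter (fun p => p.2 ≠ 0)).map Prod.fst) := by
  induction ps with
  | nil => intro s e; simp [segAux, lastStart, zipSpans]
  | cons p ps ih =>
    intro s e
    obtain ⟨i, v⟩ := p
    by_cases hv : v ≠ 0 <;> simp [segAux, lastStart, hv, zipSpans, ih]

theorem lastStart_lt (n : Int) (ps : List (Int × Int)) : ∀ (s : Int),
    (∀ p ∈ ps, p.1 < n) → s < n → lastStart s ps < n := by
  induction ps with
  | nil => intro s _ hs; simpa [lastStart] using hs
  | cons p ps ih =>
    intro s hall hs
    obtain ⟨i, v⟩ := p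
    by_cases hv : v ≠ 0
    · simp only [lastStart, if_pos hv]
      exact ih i (fun q hq => hall q (List.mem_cons_of_mem _ hq)) (hall (i, v) List.mem_cons_self)
    · simp only [lastStart, if_neg hv]
      exact ih s (fun q hq => hall q (List.mem_cons_of_mem _ hq)) hs

-- cut indices: enumerate-filter-map on A's side equals range-filter on B's side
theorem cuts_eq (tl : List Int) : ∀ (pre : List Int),
    ((PySem.List.enumerate tl (pre.length : Int)).filter (fun p => p.2 ≠ 0)).map Prod.fst
      = (PySem.List.pyRange (pre.length : Int) ((pre.length : Int) + tl.length) 1).filter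
          (fun i => PySem.List.pyGetD (pre ++ tl) i 0 ≠ 0) := by
  induction tl with
  | nil => intro pre; simp [PySem.List.enumerate_nil, PySem.List.pyRange]
  | cons t tl ih =>
    intro pre
    have hcons : PySem.List.pyRange (pre.length : Int) ((pre.length : Int) + (t :: tl).length) 1
        = (pre.length : Int) :: PySem.List.pyRange ((pre.length : Int) + 1) ((pre.length : Int) + (t :: tl).length) 1 := by
      apply PySem.List.pyRange_one_cons
      have : (0:Int) < ((t :: tl).length : Int) := by exact_mod_cast Nat.succ_pos tl.length
      omega
    have hget : PySem.List.pyGetD (pre ++ t :: tl) (pre.length : Int) 0 = t := by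
      rw [PySem.List.pyGetD_natCast]
      simp [List.getD]
    have ih' := ih (pre ++ [t])
    rw [show ((pre ++ [t]) ++ tl) = pre ++ t :: tl from by simp] at ih'
    have hL : (((pre ++ [t]).length : Nat) : Int) = (pre.length : Int) + 1 := by
      simp only [List.length_append, List.length_cons, List.length_nil]; push_cast; ring
    rw [hL] at ih'
    have hU : (pre.length : Int) + ((t :: tl).length : Nat) = (pre.length : Int) + 1 + (tl.length : Nat) := by
      simp only [List.length_cons]; push_cast; ring
    rw [PySem.List.enumerate_cons, hcons, hU, List.filter_cons, List.filter_cons, hget]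
    by_cases ht : t = 0
    · simp only [ht, ne_eq, not_true_eq_false, decide_false, Bool.false_eq_true, if_false, ih']
    · simp only [ne_eq, ht, not_false_eq_true, decide_true, if_true, List.map_cons, ih']

theorem boundaries_to_segments_eq (boundaries : List Int) :
    boundaries_to_segments boundaries = boundaries_to_segments_alt boundaries := by
  by_cases hb : boundaries = []
  · subst hb; simp [boundaries_to_segments, boundaries_to_segments_alt,
      PySem.List.slice_from_one, PySem.List.enumerate_nil]
  · unfold boundaries_to_segments boundaries_to_segments_alt
    rw [if_neg hb]
    set ps := PySem.List.enumerate (PySem.List.slice boundaries (some 1) none) 1 with hps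
    have hn : (0 : Int) < (boundaries.length : Int) := by
      have := List.length_pos_iff.mpr hb; exact_mod_cast this
    have hall : ∀ p ∈ ps, p.1 < (boundaries.length : Int) := by
      intro p hp
      rw [hps, PySem.List.mem_enumerate_iff] at hp
      obtain ⟨k, hk, rfl⟩ := hp
      rw [PySem.List.slice_from_one] at hk
      have : k < boundaries.length - 1 := by simpa [List.length_tail] using hk
      simp; omega
    rw [foldA_eq ps [] 0]
    simp only [List.nil_append]
    rw [if_pos (lastStart_lt _ ps 0 hall hn)]
    rw [seg_append_last ps 0 ((boundaries.length : Int) - 1)]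
    rw [← zip_eq_zipSpans]
    have hcuts : (ps.filter (fun p => p.2 ≠ 0)).map Prod.fst
        = (PySem.List.pyRange 1 (boundaries.length : Int) 1).filter
            (fun i => PySem.List.pyGetD boundaries i 0 ≠ 0) := by
      obtain ⟨b0, tl, rfl⟩ : ∃ b0 tl, boundaries = b0 :: tl := by
        cases boundaries with
        | nil => exact absurd rfl hb
        | cons b0 tl => exact ⟨b0, tl, rfl⟩
      have := cuts_eq tl [b0]
      simpa [hps, PySem.List.slice_from_one, List.length_cons, add_comm] using this
    rw [hcuts]

-- ===== VERDICT (by name: the statement is the Claim_ definition above) =====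
theorem boundaries_to_segments_spec : Claim_equal_boundaries_to_segments := by
  intro boundaries _
  unfold Spec_boundaries_to_segments
  exact boundaries_to_segments_eq boundaries
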